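-- pv_equiv track=rewrite | github.com/mattkistner/CS-1301 | HW06.py | sportSuggestions
-- ===== SOURCE A (Python) =====
-- def sportSuggestions(friends):
--     suggestiveDict = {}
--     for sports in friends.values():
--         for sport in sports:
--             sportList = []
--             if sport in suggestiveDict:
--                 continue
--             else:
--                 for person in friends:
--                     if sport in friends[person]:
--                         sportList.append(person)
--                     else:
--                         continue
--                 suggestiveDict[sport] = sorted(sportList)
--     return suggestiveDict
--     pass
-- ===== SOURCE B (Python) =====
-- def sportSuggestions(friends):
--     # One pass: group the players by sport as we go, then sort each group once.
--     groups = {}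
--     for person, sports in friends.items():
--         for sport in sports:
--             bucket = groups.setdefault(sport, [])
--             # persons are visited one at a time, so a repeated sport inside the
--             # same person's list can only try to re-add the most recent person
--             if not bucket or bucket[-1] != person:
--                 bucket.append(person)
--     return {sport: sorted(players) for sport, players in groups.items()}
-- ===== Notes on version B (the rewrite author's own statement) =====
-- stated objective: faster
-- what changed: Instead of rescanning every person's whole sport list once per distinct sport, B groups players by sport in a single pass over the dict and sorts each group once; Pre_ excludes association lists with duplicate person keys, which encode no Python dict.
import Mathlib
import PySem

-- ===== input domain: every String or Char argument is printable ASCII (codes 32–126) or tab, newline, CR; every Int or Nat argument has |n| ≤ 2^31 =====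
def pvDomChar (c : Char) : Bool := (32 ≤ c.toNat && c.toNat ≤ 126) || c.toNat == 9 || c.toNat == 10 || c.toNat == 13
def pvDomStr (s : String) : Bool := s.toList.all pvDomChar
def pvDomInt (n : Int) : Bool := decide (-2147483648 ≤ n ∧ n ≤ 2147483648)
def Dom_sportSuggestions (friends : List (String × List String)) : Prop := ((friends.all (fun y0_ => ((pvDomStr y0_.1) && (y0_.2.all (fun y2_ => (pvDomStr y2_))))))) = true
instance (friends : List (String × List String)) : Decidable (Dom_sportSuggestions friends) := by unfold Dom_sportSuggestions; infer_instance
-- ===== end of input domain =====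

-- B groups players by sport in ONE pass over the dict and sorts each group once,
-- instead of A's rescan of every person's whole sport list for each distinct sport.

-- ===== PORT A =====
def sportSuggestions (friends : List (String × List String)) : List (String × List String) :=
  -- suggestiveDict = {}; for sports in friends.values(): for sport in sports: …
  (friends.foldl (fun d pair =>
      pair.2.foldl (fun d sport =>
        if d.contains sport then d  -- if sport in suggestiveDict: continue
        else
          -- for person in friends: if sport in friends[person]: sportList.append(person)
          let sportList := friends.foldl (fun sl q =>
            if sport ∈ (PySem.Dict.mk friends).getD q.1 [] then sl ++ [q.1] else sl)
            ([] : List String)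
          d.insert sport (PySem.List.sorted sportList (fun x => x) false)) d)
    (PySem.Dict.empty : PySem.Dict String (List String))).items

-- ===== PORT B =====
def sportSuggestions_alt (friends : List (String × List String)) : List (String × List String) :=
  -- groups = {}; for person, sports in friends.items(): for sport in sports:
  --   bucket = groups.setdefault(sport, []); if not bucket or bucket[-1] != person: bucket.append(person)
  ((friends.foldl (fun g pair =>
      pair.2.foldl (fun g sport =>
        let bucket := g.getD sport []
        g.insert sport
          (if bucket = [] ∨ bucket.getLast? ≠ some pair.1 then bucket ++ [pair.1] else bucket)) g)
    (PySem.Dict.empty : PySem.Dict String (List String))).items).map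
    (fun p => (p.1, PySem.List.sorted p.2 (fun x => x) false))

-- ===== PRECONDITION & SPEC =====
-- Pre_ excludes association lists with duplicate person keys: they encode no Python dict
-- (dict keys are unique), so the list form has no dict counterpart A could run on.
def Pre_sportSuggestions (friends : List (String × List String)) : Prop :=
  (friends.map Prod.fst).Nodup
instance (friends : List (String × List String)) : Decidable (Pre_sportSuggestions friends) := by
  unfold Pre_sportSuggestions; infer_instance

def pvWitness_sportSuggestions : (List (String × List String)) :=
  [("ann", ["tennis", "golf"]), ("bob", ["golf"])]

def Spec_sportSuggestions (friends : List (String × List String)) (out : List (String × List String)) : Prop := out = sportSuggestions_alt friends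
instance (friends : List (String × List String)) (out : List (String × List String)) : Decidable (Spec_sportSuggestions friends out) := by unfold Spec_sportSuggestions; infer_instance

-- ===== CLAIM (what is proved, stated in full; the proofs are below) =====
def Claim_equal_sportSuggestions : Prop := ∀ (friends : List (String × List String)), Dom_sportSuggestions friends → Pre_sportSuggestions friends → Spec_sportSuggestions friends (sportSuggestions friends)

-- ===== LEMMAS AND PROOFS =====

def pvPlayers (friends : List (String × List String)) (sport : String) : List String :=
  (friends.filter (fun p => decide (sport ∈ p.2))).map Prod.fst

def pvSeen (friends : List (String × List String)) : List String :=
  PySem.Set.ofList (friends.flatMap (fun p => p.2))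

theorem pv_mem_seen (pre : List (String × List String)) (s : String) :
    s ∈ pvSeen pre ↔ ∃ q ∈ pre, s ∈ q.2 := by
  simp [pvSeen, PySem.Set.mem_ofList, List.mem_flatMap]

theorem pv_players_ne_nil (pre : List (String × List String)) (s : String) :
    pvPlayers pre s ≠ [] ↔ s ∈ pvSeen pre := by
  simp [pvPlayers, pv_mem_seen, List.filter_eq_nil_iff]

theorem pv_players_nil (pre : List (String × List String)) (s : String) (h : s ∉ pvSeen pre) :
    pvPlayers pre s = [] := by
  by_contra hne; exact h ((pv_players_ne_nil pre s).mp hne)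

theorem pv_mem_players {pre : List (String × List String)} {s y : String}
    (h : y ∈ pvPlayers pre s) : y ∈ pre.map Prod.fst := by
  simp only [pvPlayers, List.mem_map, List.mem_filter] at h
  rcases h with ⟨p, ⟨hp, _⟩, rfl⟩
  exact List.mem_map_of_mem hp

theorem pv_players_append (pre : List (String × List String)) (p : String × List String) (s : String) :
    pvPlayers (pre ++ [p]) s = pvPlayers pre s ++ (if s ∈ p.2 then [p.1] else []) := by
  simp only [pvPlayers, List.filter_append, List.map_append]
  congr 1
  by_cases h : s ∈ p.2 <;> simp [h]

theorem pv_seen_append (pre : List (String × List String)) (p : String × List String) :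
    pvSeen (pre ++ [p]) = PySem.Set.update (pvSeen pre) p.2 := by
  simp [pvSeen, List.flatMap_append, PySem.Set.ofList_append]

theorem pvA_scan (friends : List (String × List String))
    (hn : (friends.map Prod.fst).Nodup) (sport : String) :
    friends.foldl (fun sl q =>
        if sport ∈ (PySem.Dict.mk friends).getD q.1 [] then sl ++ [q.1] else sl) [] =
      pvPlayers friends sport := by
  have hk : (PySem.Dict.mk friends).keys.Nodup := by simpa [PySem.Dict.keys_mk] using hn
  have h : ∀ (sl : List String), ∀ q ∈ friends,
      (if sport ∈ (PySem.Dict.mk friends).getD q.1 [] then sl ++ [q.1] else sl)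
        = (if sport ∈ q.2 then sl ++ [q.1] else sl) := by
    intro sl q hq
    have hmem : (q.1, q.2) ∈ (PySem.Dict.mk friends).items := by simpa using hq
    rw [PySem.Dict.getD_of_mem_items _ hmem hk]
  rw [PySem.List.foldl_congr_mem _ _ _ _ h,
    PySem.List.foldl_append_ite (p := fun q => sport ∈ q.2) (f := Prod.fst)]
  simp [pvPlayers]

theorem pvA_fold (F : String → List String) (l : List String) :
    ∀ (seen : List String), seen.Nodup →
    l.foldl (fun d sport => if d.contains sport then d else d.insert sport (F sport))
        (PySem.Dict.mk (seen.map (fun s => (s, F s)))) =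
      PySem.Dict.mk ((PySem.Set.update seen l).map (fun s => (s, F s))) := by
  induction l with
  | nil => intro seen _; simp [PySem.Set.update_nil]
  | cons x l ih =>
    intro seen hnd
    have hkeys : (PySem.Dict.mk (seen.map (fun s => (s, F s)))).keys = seen := by
      simp [PySem.Dict.keys_mk, Function.comp_def]
    have hc : (PySem.Dict.mk (seen.map (fun s => (s, F s)))).contains x = decide (x ∈ seen) := by
      rw [PySem.Dict.contains_eq_decide_mem_keys, hkeys]
    simp only [List.foldl_cons, hc]
    by_cases hx : x ∈ seen
    · simp only [hx, decide_true, if_true]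
      rw [ih seen hnd]
      have : PySem.Set.update seen (x :: l) = PySem.Set.update seen l := by
        rw [PySem.Set.update_cons, PySem.Set.add_of_mem hx]
      rw [this]
    · simp only [hx, decide_false, Bool.false_eq_true, if_false]
      have hins : ((PySem.Dict.mk (seen.map (fun s => (s, F s)))).insert x (F x)) =
          PySem.Dict.mk ((seen ++ [x]).map (fun s => (s, F s))) := by
        apply PySem.Dict.ext
        rw [PySem.Dict.items_insert_of_not_contains _ _ (by rw [hc]; simp [hx])]
        simp
      rw [hins, ih (seen ++ [x]) (by
        simp only [List.nodup_append, List.nodup_cons, List.nodup_nil, and_true]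
        refine ⟨hnd, List.not_mem_nil, ?_⟩
        intro a ha b hb
        rw [List.mem_singleton] at hb
        subst hb
        exact fun hax => hx (hax ▸ ha))]
      have : PySem.Set.update seen (x :: l) = PySem.Set.update (seen ++ [x]) l := by
        rw [PySem.Set.update_cons, PySem.Set.add_of_not_mem hx]
      rw [this]

theorem pvA_outer (F : String → List String) (fr : List (String × List String)) :
    ∀ (seen : List String), seen.Nodup →
    fr.foldl (fun d pair =>
        pair.2.foldl (fun d sport => if d.contains sport then d else d.insert sport (F sport)) d)
        (PySem.Dict.mk (seen.map (fun s => (s, F s)))) =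
      PySem.Dict.mk ((PySem.Set.update seen (fr.flatMap (fun p => p.2))).map (fun s => (s, F s))) := by
  induction fr with
  | nil => intro seen _; simp [PySem.Set.update_nil]
  | cons p fr ih =>
    intro seen hnd
    simp only [List.foldl_cons, List.flatMap_cons]
    rw [pvA_fold F p.2 seen hnd, ih _ (PySem.Set.nodup_update _ _ hnd),
      PySem.Set.update_append]

theorem pvA_result (friends : List (String × List String))
    (hn : (friends.map Prod.fst).Nodup) :
    sportSuggestions friends =
      (pvSeen friends).map
        (fun s => (s, PySem.List.sorted (pvPlayers friends s) (fun x => x) false)) := by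
  unfold sportSuggestions
  have hfun : (fun (d : PySem.Dict String (List String)) (pair : String × List String) =>
      pair.2.foldl (fun d sport =>
        if d.contains sport then d
        else
          let sportList := friends.foldl (fun sl q =>
            if sport ∈ (PySem.Dict.mk friends).getD q.1 [] then sl ++ [q.1] else sl)
            ([] : List String)
          d.insert sport (PySem.List.sorted sportList (fun x => x) false)) d) =
      (fun d pair => pair.2.foldl (fun d sport =>
        if d.contains sport then d
        else d.insert sport (PySem.List.sorted (pvPlayers friends sport) (fun x => x) false)) d) := by
    funext d pair
    congr 1
    funext d' s
    rw [pvA_scan friends hn s]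
  rw [hfun]
  have hempty : (PySem.Dict.empty : PySem.Dict String (List String)) =
      PySem.Dict.mk (([] : List String).map
        (fun s => (s, PySem.List.sorted (pvPlayers friends s) (fun x => x) false))) := rfl
  rw [hempty, pvA_outer _ friends [] List.nodup_nil]
  rfl

-- group value after the sports prefix q of person p1 has been processed on top of pre
def pvG (pre : List (String × List String)) (p1 : String) (q : List String) (s : String) :
    String × List String :=
  (s, pvPlayers pre s ++ (if s ∈ q then [p1] else []))

theorem pvB_inner (pre : List (String × List String)) (p1 : String)
    (hp : p1 ∉ pre.map Prod.fst) (l : List String) :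
    ∀ (q : List String),
    l.foldl (fun g sport =>
        let bucket := g.getD sport []
        g.insert sport
          (if bucket = [] ∨ bucket.getLast? ≠ some p1 then bucket ++ [p1] else bucket))
      (PySem.Dict.mk ((PySem.Set.update (pvSeen pre) q).map (pvG pre p1 q))) =
    PySem.Dict.mk ((PySem.Set.update (pvSeen pre) (q ++ l)).map (pvG pre p1 (q ++ l))) := by
  induction l with
  | nil => intro q; simp
  | cons x l ih =>
    intro q
    set K := PySem.Set.update (pvSeen pre) q with hK
    have hKnd : K.Nodup := PySem.Set.nodup_update _ _ (PySem.Set.nodup_ofList _)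
    have hkeys : (PySem.Dict.mk (K.map (pvG pre p1 q))).keys = K := by
      simp [PySem.Dict.keys_mk, pvG, Function.comp_def]
    have hc : (PySem.Dict.mk (K.map (pvG pre p1 q))).contains x = decide (x ∈ K) := by
      rw [PySem.Dict.contains_eq_decide_mem_keys, hkeys]
    have hstep : (PySem.Dict.mk (K.map (pvG pre p1 q))).insert x
        (let bucket := (PySem.Dict.mk (K.map (pvG pre p1 q))).getD x []
         if bucket = [] ∨ bucket.getLast? ≠ some p1 then bucket ++ [p1] else bucket) =
        PySem.Dict.mk ((PySem.Set.update (pvSeen pre) (q ++ [x])).map (pvG pre p1 (q ++ [x]))) := by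
      have hnd' : (PySem.Dict.mk (K.map (pvG pre p1 q))).keys.Nodup := by rw [hkeys]; exact hKnd
      by_cases hx : x ∈ K
      · -- the sport already has a bucket
        have hmem : pvG pre p1 q x ∈ K.map (pvG pre p1 q) := List.mem_map_of_mem hx
        have hbucket : (PySem.Dict.mk (K.map (pvG pre p1 q))).getD x [] =
            pvPlayers pre x ++ (if x ∈ q then [p1] else []) :=
          PySem.Dict.getD_of_mem_items _ (by exact hmem) hnd' []
        have hupd : PySem.Set.update (pvSeen pre) (q ++ [x]) = K := by
          rw [PySem.Set.update_append, ← hK, PySem.Set.update_cons, PySem.Set.update_nil,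
            PySem.Set.add_of_mem hx]
        have hval : (let bucket := (PySem.Dict.mk (K.map (pvG pre p1 q))).getD x []
            if bucket = [] ∨ bucket.getLast? ≠ some p1 then bucket ++ [p1] else bucket) =
            pvPlayers pre x ++ [p1] := by
          simp only [hbucket]
          by_cases hq : x ∈ q
          · simp only [hq, if_true]
            rw [if_neg]
            simp
          · simp only [hq, if_false, List.append_nil]
            have hxseen : x ∈ pvSeen pre := by
              rcases (PySem.Set.mem_update _ _ _).mp hx with h | h
              · exact h
              · exact absurd h hq
            have hne : pvPlayers pre x ≠ [] := (pv_players_ne_nil pre x).mpr hxseen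
            rw [if_pos]
            right
            intro hlast
            have hy : p1 ∈ pvPlayers pre x := List.mem_of_getLast? hlast
            exact hp (pv_mem_players hy)
        rw [hval]
        apply PySem.Dict.ext
        rw [PySem.Dict.items_insert_of_contains _ _ (by rw [hc]; simp [hx])]
        show List.map _ (K.map (pvG pre p1 q)) = _
        rw [hupd, List.map_map]
        apply List.map_congr_left
        intro s hs
        by_cases hsx : s = x
        · subst hsx
          simp [pvG]
        · have h1 : (pvG pre p1 q s).1 = s := rfl
          simp only [Function.comp_def, pvG, beq_iff_eq, hsx, if_false]
          have : (s ∈ q ++ [x]) ↔ s ∈ q := by simp [hsx]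
          simp [this]
      · -- a brand-new sport: the bucket is the default []
        have hbucket : (PySem.Dict.mk (K.map (pvG pre p1 q))).getD x [] = [] := by
          apply PySem.Dict.getD_of_not_contains
          rw [hc]; simp [hx]
        have hxq : x ∉ q := fun h => hx ((PySem.Set.mem_update _ _ _).mpr (Or.inr h))
        have hxseen : x ∉ pvSeen pre := fun h => hx ((PySem.Set.mem_update _ _ _).mpr (Or.inl h))
        have hupd : PySem.Set.update (pvSeen pre) (q ++ [x]) = K ++ [x] := by
          rw [PySem.Set.update_append, ← hK, PySem.Set.update_cons, PySem.Set.update_nil,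
            PySem.Set.add_of_not_mem hx]
        have hval : (let bucket := (PySem.Dict.mk (K.map (pvG pre p1 q))).getD x []
            if bucket = [] ∨ bucket.getLast? ≠ some p1 then bucket ++ [p1] else bucket) = [p1] := by
          simp [hbucket]
        rw [hval]
        apply PySem.Dict.ext
        rw [PySem.Dict.items_insert_of_not_contains _ _ (by rw [hc]; simp [hx])]
        show K.map (pvG pre p1 q) ++ [(x, [p1])] = _
        rw [hupd, List.map_append]
        congr 1
        · apply List.map_congr_left
          intro s hs
          have hsx : s ≠ x := fun h => hx (h ▸ hs)
          have : (s ∈ q ++ [x]) ↔ s ∈ q := by simp [hsx]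
          simp [pvG, this]
        · simp [pvG, pv_players_nil pre x hxseen]
    have happ : (let bucket := (PySem.Dict.mk (K.map (pvG pre p1 q))).getD x []
        (PySem.Dict.mk (K.map (pvG pre p1 q))).insert x
          (if bucket = [] ∨ bucket.getLast? ≠ some p1 then bucket ++ [p1] else bucket)) =
        PySem.Dict.mk ((PySem.Set.update (pvSeen pre) (q ++ [x])).map (pvG pre p1 (q ++ [x]))) := hstep
    rw [List.foldl_cons, happ, ih (q ++ [x]), List.append_assoc]
    rfl


theorem pvB_outer (fr : List (String × List String)) :
    ∀ (pre : List (String × List String)), ((pre ++ fr).map Prod.fst).Nodup →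
    fr.foldl (fun g pair =>
        pair.2.foldl (fun g sport =>
          let bucket := g.getD sport []
          g.insert sport
            (if bucket = [] ∨ bucket.getLast? ≠ some pair.1 then bucket ++ [pair.1] else bucket)) g)
      (PySem.Dict.mk ((pvSeen pre).map (fun s => (s, pvPlayers pre s)))) =
    PySem.Dict.mk ((pvSeen (pre ++ fr)).map (fun s => (s, pvPlayers (pre ++ fr) s))) := by
  induction fr with
  | nil => intro pre _; rw [List.append_nil]; rfl
  | cons p fr ih =>
    intro pre hnd
    have hp : p.1 ∉ pre.map Prod.fst := by
      rw [List.map_append, List.nodup_append] at hnd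
      intro hmem
      have h2 : p.1 ∈ List.map Prod.fst (p :: fr) := by
        simp only [List.map_cons]
        exact List.mem_cons_self
      exact hnd.2.2 p.1 hmem p.1 h2 rfl
    have hstart : (PySem.Dict.mk ((pvSeen pre).map (fun s => (s, pvPlayers pre s)))) =
        PySem.Dict.mk ((PySem.Set.update (pvSeen pre) []).map (pvG pre p.1 [])) := by
      rw [PySem.Set.update_nil]
      congr 1
      apply List.map_congr_left
      intro s _
      simp [pvG]
    have hinner := pvB_inner pre p.1 hp p.2 []
    rw [List.foldl_cons, hstart, hinner]
    have hmid : PySem.Dict.mk ((PySem.Set.update (pvSeen pre) ([] ++ p.2)).map (pvG pre p.1 ([] ++ p.2))) =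
        PySem.Dict.mk ((pvSeen (pre ++ [p])).map (fun s => (s, pvPlayers (pre ++ [p]) s))) := by
      rw [List.nil_append, ← pv_seen_append]
      congr 1
      apply List.map_congr_left
      intro s _
      rw [pvG, ← pv_players_append]
    rw [hmid, ih (pre ++ [p]) (by rwa [List.append_assoc, List.singleton_append])]
    rw [List.append_assoc, List.singleton_append]

theorem pvB_result (friends : List (String × List String))
    (hn : (friends.map Prod.fst).Nodup) :
    sportSuggestions_alt friends =
      (pvSeen friends).map
        (fun s => (s, PySem.List.sorted (pvPlayers friends s) (fun x => x) false)) := by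
  unfold sportSuggestions_alt
  have hempty : (PySem.Dict.empty : PySem.Dict String (List String)) =
      PySem.Dict.mk ((pvSeen []).map (fun s => (s, pvPlayers [] s))) := rfl
  rw [hempty, pvB_outer friends [] (by simpa using hn)]
  show ((pvSeen ([] ++ friends)).map (fun s => (s, pvPlayers ([] ++ friends) s))).map _ = _
  rw [List.nil_append, List.map_map]
  apply List.map_congr_left
  intro s _
  rfl


-- ===== VERDICT (by name: the statement is the Claim_ definition above) =====
theorem sportSuggestions_spec : Claim_equal_sportSuggestions := by
  intro friends _ hpre
  unfold Spec_sportSuggestions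
  rw [pvA_result friends hpre, pvB_result friends hpre]
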